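-- pv_equiv track=rewrite | github.com/greplist/mmod | 4.py | resolve_index
-- ===== SOURCE A (Python) =====
-- def resolve_index(PI, x):
--     P = list([sum(PI[:i+1]) for i in range(len(PI))])
--
--     pred = 0
--     for i, p in enumerate(P):
--         if pred <= x and x <= p:
--             return i
--         pred = p
--
--     raise Exception("Unreacheble, may be x > 1? (x = {})".format(x))
-- ===== SOURCE B (Python) =====
-- def resolve_index(PI, x):
--     s = 0
--     for i, v in enumerate(PI):
--         t = s + v
--         if s <= x and x <= t:
--             return i
--         s = t
--     raise Exception("Unreacheble, may be x > 1? (x = {})".format(x))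
-- ===== Notes on version B (the rewrite author's own statement) =====
-- stated objective: faster
-- what changed: B fuses A's quadratic prefix-sum list construction (sum(PI[:i+1]) per index) and the subsequent scan into a single pass maintaining one running sum.
import Mathlib
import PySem

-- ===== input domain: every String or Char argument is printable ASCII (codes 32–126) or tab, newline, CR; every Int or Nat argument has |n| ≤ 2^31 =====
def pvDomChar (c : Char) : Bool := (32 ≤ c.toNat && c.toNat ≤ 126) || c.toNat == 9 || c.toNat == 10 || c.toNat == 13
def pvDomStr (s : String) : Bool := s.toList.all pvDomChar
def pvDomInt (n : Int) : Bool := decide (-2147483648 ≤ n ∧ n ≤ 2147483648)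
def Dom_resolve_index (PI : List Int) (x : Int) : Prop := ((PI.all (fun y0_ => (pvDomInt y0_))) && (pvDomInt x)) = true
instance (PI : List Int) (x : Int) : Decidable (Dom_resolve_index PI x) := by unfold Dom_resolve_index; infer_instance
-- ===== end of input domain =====

-- One honest line: B fuses A's quadratic prefix-sum list construction and the interval scan
-- into a single running-sum pass (objective: faster, O(n^2) -> O(n)).

-- ===== PORT A =====
-- A's scan over enumerate(P): if pred <= x <= p return i else pred = p; Python raises
-- at the end of the loop, so the empty case (excluded by Pre_) returns a placeholder 0.
def resolveALoop (x : Int) : List (Int × Int) → Int → Int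
  | [], _ => 0
  | (i, p) :: rest, pred => if pred ≤ x ∧ x ≤ p then i else resolveALoop x rest p

def resolve_index (PI : List Int) (x : Int) : Int :=
  let P := (PySem.List.pyRange 0 (PySem.List.len PI) 1).map
    (fun i => (PySem.List.slice PI none (some (i + 1))).sum)
  resolveALoop x (PySem.List.enumerate P 0) 0

-- ===== PORT B =====
-- B's single pass: running sum s, t = s + v; Python raises at the end of the loop,
-- so the empty case (excluded by Pre_) returns a placeholder 0.
def resolveBLoop (x : Int) : List Int → Int → Int → Int
  | [], _, _ => 0
  | v :: rest, i, s =>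
    let t := s + v
    if s ≤ x ∧ x ≤ t then i else resolveBLoop x rest (i + 1) t

def resolve_index_alt (PI : List Int) (x : Int) : Int :=
  resolveBLoop x PI 0 0

-- ===== PRECONDITION & SPEC =====
-- Pre_ admits exactly the inputs on which Python A returns: some interval
-- [sum(PI[:i]), sum(PI[:i+1])] contains x; otherwise both Pythons raise Exception.
def Pre_resolve_index (PI : List Int) (x : Int) : Prop :=
  ∃ i < PI.length, (PI.take i).sum ≤ x ∧ x ≤ (PI.take (i + 1)).sum
instance (PI : List Int) (x : Int) : Decidable (Pre_resolve_index PI x) := by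
  unfold Pre_resolve_index; infer_instance

def pvWitness_resolve_index : List Int × Int := ([1], 0)

def Spec_resolve_index (PI : List Int) (x : Int) (out : Int) : Prop := out = resolve_index_alt PI x
instance (PI : List Int) (x : Int) (out : Int) : Decidable (Spec_resolve_index PI x out) := by
  unfold Spec_resolve_index; infer_instance

-- ===== CLAIM (what is proved, stated in full; the proofs are below) =====
def Claim_equal_resolve_index : Prop := ∀ (PI : List Int) (x : Int), Dom_resolve_index PI x → Pre_resolve_index PI x → Spec_resolve_index PI x (resolve_index PI x)

-- ===== LEMMAS AND PROOFS =====

-- running prefix sums of PI starting from accumulator s (the list A names P, generalized)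
def psums (s : Int) : List Int → List Int
  | [] => []
  | v :: rest => (s + v) :: psums (s + v) rest

lemma map_range_take_sum (PI : List Int) (s : Int) :
    (List.range PI.length).map (fun j => s + (PI.take (j + 1)).sum) = psums s PI := by
  induction PI generalizing s with
  | nil => simp [psums]
  | cons v rest ih =>
    simp only [List.length_cons, List.range_succ_eq_map, List.map_cons, List.map_map]
    simp only [psums, List.take_succ_cons, List.take_zero, List.sum_cons, List.sum_nil,
      Function.comp]
    refine congrArg₂ List.cons (by ring) ?_
    rw [← ih (s + v)]
    apply List.map_congr_left
    intro j _
    simp only [Function.comp_apply, Nat.succ_eq_add_one]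
    ring

lemma P_eq_psums (PI : List Int) :
    (PySem.List.pyRange 0 (PySem.List.len PI) 1).map
      (fun i => (PySem.List.slice PI none (some (i + 1))).sum) = psums 0 PI := by
  rw [PySem.List.len_eq, PySem.List.pyRange_one]
  simp only [zero_add, Int.sub_zero, Int.toNat_natCast, List.map_map]
  rw [← map_range_take_sum PI 0]
  apply List.map_congr_left
  intro j _
  show (PySem.List.slice PI none (some ((j : Int) + 1))).sum = 0 + (PI.take (j + 1)).sum
  have : ((j : Int) + 1) = ((j + 1 : Nat) : Int) := by push_cast; ring
  rw [this, PySem.List.slice_to_natCast]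
  simp

lemma loops_agree (x : Int) (PI : List Int) (k s : Int) :
    resolveALoop x (PySem.List.enumerate (psums s PI) k) s = resolveBLoop x PI k s := by
  induction PI generalizing k s with
  | nil => simp [psums, PySem.List.enumerate_nil, resolveALoop, resolveBLoop]
  | cons v rest ih =>
    simp only [psums, PySem.List.enumerate_cons, resolveALoop, resolveBLoop]
    split_ifs with h
    · rfl
    · exact ih (k + 1) (s + v)

-- ===== VERDICT (by name: the statement is the Claim_ definition above) =====
theorem resolve_index_spec : Claim_equal_resolve_index := by
  intro PI x _ _
  unfold Spec_resolve_index resolve_index resolve_index_alt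
  rw [P_eq_psums]
  exact loops_agree x PI 0 0
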